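-- pv_equiv track=rewrite | github.com/qiancai/ai-pr-translator | scripts/keword_processor.py | _compute_expected_target_delta
-- ===== SOURCE A (Python) =====
-- def extract_keyword_name(line):
--     """Extract the keyword name from '- ADD (R)' -> 'ADD'."""
--     stripped = line.strip()
--     if stripped.startswith('- '):
--         rest = stripped[2:].strip()
--         return rest.split()[0] if rest else ''
--     return ''
--
-- def _extract_keyword_map(block):
--     """Extract keyword-name -> full line mapping from a letter block."""
--     if not block:
--         return {}
--
--     keyword_map = {}
--     for raw_line in block.splitlines():
--         stripped = raw_line.strip()
--         if not stripped.startswith('- '):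
--             continue
--         name = extract_keyword_name(stripped)
--         if not name:
--             continue
--         keyword_map[name] = stripped
--     return keyword_map
--
-- def _compute_expected_target_delta(source_old_block, source_new_block, target_old_block):
--     """Compute expected effective keyword delta on target block."""
--     source_old_map = _extract_keyword_map(source_old_block)
--     source_new_map = _extract_keyword_map(source_new_block)
--     target_old_map = _extract_keyword_map(target_old_block)
--
--     source_added = set(source_new_map.keys()) - set(source_old_map.keys())
--     source_deleted = set(source_old_map.keys()) - set(source_new_map.keys())
--     source_modified = {
--         name for name in (set(source_old_map.keys()) & set(source_new_map.keys()))
--         if source_old_map[name] != source_new_map[name]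
--     }
--
--     expected_added = {name for name in source_added if name not in target_old_map}
--     expected_deleted = {name for name in source_deleted if name in target_old_map}
--     allowed_modified = {name for name in source_modified if name in target_old_map}
--
--     return expected_added, expected_deleted, allowed_modified
-- ===== SOURCE B (Python) =====
-- def extract_keyword_name(line):
--     """Extract the keyword name from '- ADD (R)' -> 'ADD'."""
--     stripped = line.strip()
--     if stripped.startswith('- '):
--         rest = stripped[2:].strip()
--         return rest.split()[0] if rest else ''
--     return ''
--
-- def _extract_keyword_map(block):
--     """Extract keyword-name -> full line mapping from a letter block."""
--     if not block:
--         return {}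
--
--     keyword_map = {}
--     for raw_line in block.splitlines():
--         stripped = raw_line.strip()
--         if not stripped.startswith('- '):
--             continue
--         name = extract_keyword_name(stripped)
--         if not name:
--             continue
--         keyword_map[name] = stripped
--     return keyword_map
--
-- def _compute_expected_target_delta(source_old_block, source_new_block, target_old_block):
--     """Single classification pass over the union of source keyword names,
--     instead of building three set differences/intersections and filtering them."""
--     old_map = _extract_keyword_map(source_old_block)
--     new_map = _extract_keyword_map(source_new_block)
--     target_map = _extract_keyword_map(target_old_block)
--
--     expected_added, expected_deleted, allowed_modified = set(), set(), set()
--     names = list(old_map) + [n for n in new_map if n not in old_map]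
--     for name in names:
--         if name not in old_map:  # only in source_new
--             if name not in target_map:
--                 expected_added.add(name)
--         elif name not in new_map:  # only in source_old
--             if name in target_map:
--                 expected_deleted.add(name)
--         elif old_map[name] != new_map[name] and name in target_map:
--             allowed_modified.add(name)
--     return expected_added, expected_deleted, allowed_modified
-- ===== Notes on version B (the rewrite author's own statement) =====
-- stated objective: alternative
-- what changed: Replaces the three set-algebra passes (two set differences, an intersection, then three filtering comprehensions) with a single classification loop over the union of source-old and source-new keyword names that fills all three result sets in one traversal.
import Mathlib
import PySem

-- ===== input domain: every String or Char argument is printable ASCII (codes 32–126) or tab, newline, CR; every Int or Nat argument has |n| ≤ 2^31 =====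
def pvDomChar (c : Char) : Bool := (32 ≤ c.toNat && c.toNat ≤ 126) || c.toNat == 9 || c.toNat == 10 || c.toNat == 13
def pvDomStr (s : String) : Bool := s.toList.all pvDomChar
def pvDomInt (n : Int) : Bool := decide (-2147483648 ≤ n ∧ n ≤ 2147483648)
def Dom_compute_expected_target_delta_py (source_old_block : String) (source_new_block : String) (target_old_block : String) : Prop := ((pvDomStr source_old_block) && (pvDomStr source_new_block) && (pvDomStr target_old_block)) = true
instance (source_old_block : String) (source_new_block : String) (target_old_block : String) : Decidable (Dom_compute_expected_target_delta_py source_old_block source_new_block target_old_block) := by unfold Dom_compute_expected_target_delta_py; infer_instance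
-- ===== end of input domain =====

-- B replaces A's three set-algebra passes by one classification loop over the union of
-- source key names; same results, alternative decomposition (no speed claim).


-- ===== PORT A =====
-- Shared helpers: Source A's `extract_keyword_name` / `_extract_keyword_map` appear verbatim in
-- Source B as well (same-module helpers both implementations call), so they are ported once.
-- `rest.split()[0]` is ported with pyGetD: when `rest` is nonempty and stripped, split₀ is
-- nonempty, so index 0 never raises and the default is never used.
def extract_keyword_name_py (line : String) : String :=
  let stripped := PySem.Str.strip line
  if PySem.Str.startswith stripped "- " then
    let rest := PySem.Str.strip (PySem.Str.slice stripped (some 2) none)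
    if rest ≠ "" then PySem.List.pyGetD (PySem.Str.split₀ rest) 0 "" else ""
  else ""

def extract_keyword_map_py (block : String) : PySem.Dict String String :=
  if block = "" then PySem.Dict.empty
  else
    (PySem.Str.splitlines block).foldl
      (fun d raw_line =>
        let stripped := PySem.Str.strip raw_line
        if ¬ PySem.Str.startswith stripped "- " then d
        else
          let name := extract_keyword_name_py stripped
          if name = "" then d else d.insert name stripped)
      PySem.Dict.empty

def compute_expected_target_delta_py (source_old_block : String) (source_new_block : String) (target_old_block : String) : List String × List String × List String :=
  let source_old_map := extract_keyword_map_py source_old_block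
  let source_new_map := extract_keyword_map_py source_new_block
  let target_old_map := extract_keyword_map_py target_old_block
  let source_added := PySem.Set.diff (PySem.Set.ofList source_new_map.keys) (PySem.Set.ofList source_old_map.keys)
  let source_deleted := PySem.Set.diff (PySem.Set.ofList source_old_map.keys) (PySem.Set.ofList source_new_map.keys)
  let source_modified := (PySem.Set.inter (PySem.Set.ofList source_old_map.keys) (PySem.Set.ofList source_new_map.keys)).filter
      (fun name => PySem.Dict.getD source_old_map name "" != PySem.Dict.getD source_new_map name "")
  let expected_added := source_added.filter (fun name => ! target_old_map.contains name)
  let expected_deleted := source_deleted.filter (fun name => target_old_map.contains name)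
  let allowed_modified := source_modified.filter (fun name => target_old_map.contains name)
  (expected_added, expected_deleted, allowed_modified)

-- ===== PORT B =====
-- B-side helper: the body of Source B's classification loop, named so the fold can be reasoned about.
def pvStep (old_map new_map target_map : PySem.Dict String String)
    (acc : List String × List String × List String) (name : String) :
    List String × List String × List String :=
  let (added, deleted, modified) := acc
  if ! old_map.contains name then
    if ! target_map.contains name then (PySem.Set.add added name, deleted, modified) else acc
  else if ! new_map.contains name then
    if target_map.contains name then (added, PySem.Set.add deleted name, modified) else acc
  else if (PySem.Dict.getD old_map name "" != PySem.Dict.getD new_map name "") && target_map.contains name then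
    (added, deleted, PySem.Set.add modified name)
  else acc

def compute_expected_target_delta_py_alt (source_old_block : String) (source_new_block : String) (target_old_block : String) : List String × List String × List String :=
  let old_map := extract_keyword_map_py source_old_block
  let new_map := extract_keyword_map_py source_new_block
  let target_map := extract_keyword_map_py target_old_block
  let names := old_map.keys ++ new_map.keys.filter (fun n => ! old_map.contains n)
  names.foldl (pvStep old_map new_map target_map)
    ((PySem.Set.empty : PySem.Set String), (PySem.Set.empty : PySem.Set String), (PySem.Set.empty : PySem.Set String))

-- ===== PRECONDITION & SPEC =====
def Spec_compute_expected_target_delta_py (source_old_block : String) (source_new_block : String) (target_old_block : String) (out : List String × List String × List String) : Prop := out = compute_expected_target_delta_py_alt source_old_block source_new_block target_old_block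
instance (source_old_block : String) (source_new_block : String) (target_old_block : String) (out : List String × List String × List String) : Decidable (Spec_compute_expected_target_delta_py source_old_block source_new_block target_old_block out) := by unfold Spec_compute_expected_target_delta_py; infer_instance

-- ===== CLAIM (what is proved, stated in full; the proofs are below) =====
def Claim_equal_compute_expected_target_delta_py : Prop := ∀ (source_old_block : String) (source_new_block : String) (target_old_block : String), Dom_compute_expected_target_delta_py source_old_block source_new_block target_old_block → Spec_compute_expected_target_delta_py source_old_block source_new_block target_old_block (compute_expected_target_delta_py source_old_block source_new_block target_old_block)

-- ===== LEMMAS AND PROOFS =====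

-- keys of the extracted map carry no duplicates
theorem pv_nodup_keys_foldl_step (l : List String)
    (d : PySem.Dict String String) (h : d.keys.Nodup) :
    ((l.foldl
      (fun d raw_line =>
        let stripped := PySem.Str.strip raw_line
        if ¬ PySem.Str.startswith stripped "- " then d
        else
          let name := extract_keyword_name_py stripped
          if name = "" then d else d.insert name stripped)
      d).keys).Nodup := by
  induction l generalizing d with
  | nil => simpa using h
  | cons x xs ih =>
      simp only [List.foldl_cons]
      apply ih
      dsimp only
      split_ifs with h1 h2
      · exact h
      · exact PySem.Dict.nodup_keys_insert _ _ _ h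
      · exact h

theorem pv_nodup_keys (block : String) : (extract_keyword_map_py block).keys.Nodup := by
  unfold extract_keyword_map_py
  split_ifs with h
  · simp [PySem.Dict.keys_empty]
  · exact pv_nodup_keys_foldl_step _ _ (by simp [PySem.Dict.keys_empty])

-- Set.add appends when the element is fresh
theorem pv_set_add_not_mem (a : List String) (n : String) (h : n ∉ a) :
    PySem.Set.add a n = a ++ [n] := by
  simp [PySem.Set.add, PySem.Set.contains_eq_listContains, List.contains_eq_mem, h]

-- the classification fold produces three filtered lists
theorem pv_fold_classify (old_map new_map target_map : PySem.Dict String String)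
    (names : List String) (a d m : List String) (hnodup : names.Nodup)
    (ha : ∀ n ∈ names, n ∉ a) (hd : ∀ n ∈ names, n ∉ d) (hm : ∀ n ∈ names, n ∉ m) :
    names.foldl (pvStep old_map new_map target_map) (a, d, m)
    = (a ++ names.filter (fun n => ! old_map.contains n && ! target_map.contains n),
       d ++ names.filter (fun n => old_map.contains n && ! new_map.contains n && target_map.contains n),
       m ++ names.filter (fun n => old_map.contains n && new_map.contains n &&
              (PySem.Dict.getD old_map n "" != PySem.Dict.getD new_map n "") && target_map.contains n)) := by
  induction names generalizing a d m with
  | nil => simp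
  | cons n rest ih =>
      obtain ⟨hnn, hnodup'⟩ := List.nodup_cons.mp hnodup
      have hna : n ∉ a := ha n (by simp)
      have hnd0 : n ∉ d := hd n (by simp)
      have hnm0 : n ∉ m := hm n (by simp)
      have ha0 : ∀ x ∈ rest, x ∉ a := fun x hx => ha x (by simp [hx])
      have hd0 : ∀ x ∈ rest, x ∉ d := fun x hx => hd x (by simp [hx])
      have hm0 : ∀ x ∈ rest, x ∉ m := fun x hx => hm x (by simp [hx])
      have ha' : ∀ x ∈ rest, x ∉ a ++ [n] := by
        intro x hx
        simp only [List.mem_append, List.mem_singleton]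
        rintro (hxa | rfl)
        · exact ha0 x hx hxa
        · exact hnn hx
      have hd' : ∀ x ∈ rest, x ∉ d ++ [n] := by
        intro x hx
        simp only [List.mem_append, List.mem_singleton]
        rintro (hxd | rfl)
        · exact hd0 x hx hxd
        · exact hnn hx
      have hm' : ∀ x ∈ rest, x ∉ m ++ [n] := by
        intro x hx
        simp only [List.mem_append, List.mem_singleton]
        rintro (hxm | rfl)
        · exact hm0 x hx hxm
        · exact hnn hx
      rw [List.foldl_cons]
      cases h1 : old_map.contains n with
      | false =>
          cases h2 : target_map.contains n with
          | false =>
              have hstep : pvStep old_map new_map target_map (a, d, m) n = (a ++ [n], d, m) := by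
                simp [pvStep, h1, h2, pv_set_add_not_mem a n hna]
              rw [hstep, ih (a ++ [n]) d m hnodup' ha' hd0 hm0]
              simp [h1, h2]
          | true =>
              have hstep : pvStep old_map new_map target_map (a, d, m) n = (a, d, m) := by
                simp [pvStep, h1, h2]
              rw [hstep, ih a d m hnodup' ha0 hd0 hm0]
              simp [h1, h2]
      | true =>
          cases h3 : new_map.contains n with
          | false =>
              cases h4 : target_map.contains n with
              | true =>
                  have hstep : pvStep old_map new_map target_map (a, d, m) n = (a, d ++ [n], m) := by
                    simp [pvStep, h1, h3, h4, pv_set_add_not_mem d n hnd0]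
                  rw [hstep, ih a (d ++ [n]) m hnodup' ha0 hd' hm0]
                  simp [h1, h3, h4]
              | false =>
                  have hstep : pvStep old_map new_map target_map (a, d, m) n = (a, d, m) := by
                    simp [pvStep, h1, h3, h4]
                  rw [hstep, ih a d m hnodup' ha0 hd0 hm0]
                  simp [h1, h3, h4]
          | true =>
              cases h5 : (PySem.Dict.getD old_map n "" != PySem.Dict.getD new_map n "") && target_map.contains n with
              | true =>
                  have hstep : pvStep old_map new_map target_map (a, d, m) n = (a, d, m ++ [n]) := by
                    simp [pvStep, h1, h3, h5, pv_set_add_not_mem m n hnm0]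
                  rw [hstep, ih a d (m ++ [n]) hnodup' ha0 hd0 hm']
                  simp [h1, h3, h5]
              | false =>
                  have hstep : pvStep old_map new_map target_map (a, d, m) n = (a, d, m) := by
                    simp [pvStep, h1, h3, h5]
                  rw [hstep, ih a d m hnodup' ha0 hd0 hm0]
                  simp [h1, h3, h5]

-- the two ports agree
theorem pv_main (s1 s2 s3 : String) :
    compute_expected_target_delta_py s1 s2 s3 = compute_expected_target_delta_py_alt s1 s2 s3 := by
  have ndo := pv_nodup_keys s1
  have ndn := pv_nodup_keys s2
  have hokC : ∀ x ∈ (extract_keyword_map_py s1).keys, (extract_keyword_map_py s1).contains x = true :=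
    fun x hx => (PySem.Dict.contains_iff_mem_keys _ _).mpr hx
  have hdisj : (extract_keyword_map_py s1).keys.Disjoint
      ((extract_keyword_map_py s2).keys.filter (fun n => ! (extract_keyword_map_py s1).contains n)) := by
    intro x hx hx'
    have := (List.mem_filter.mp hx').2
    rw [hokC x hx] at this
    simp at this
  have hnodup : ((extract_keyword_map_py s1).keys ++
      (extract_keyword_map_py s2).keys.filter (fun n => ! (extract_keyword_map_py s1).contains n)).Nodup :=
    List.Nodup.append ndo (ndn.filter _) hdisj
  have hSet : ∀ (l : List String) (x : String), PySem.Set.contains l x = decide (x ∈ l) := by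
    intro l x
    rw [PySem.Set.contains_eq_listContains, List.contains_eq_mem]
  unfold compute_expected_target_delta_py compute_expected_target_delta_py_alt
  dsimp only [PySem.Set.empty]
  rw [pv_fold_classify (extract_keyword_map_py s1) (extract_keyword_map_py s2) (extract_keyword_map_py s3)
      _ [] [] [] hnodup (by simp) (by simp) (by simp)]
  simp only [List.nil_append]
  refine Prod.ext ?_ (Prod.ext ?_ ?_)
  · -- added component
    show (PySem.Set.diff (PySem.Set.ofList (extract_keyword_map_py s2).keys)
          (PySem.Set.ofList (extract_keyword_map_py s1).keys)).filter
          (fun name => ! (extract_keyword_map_py s3).contains name) = _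
    rw [PySem.Set.ofList_eq_self_of_nodup _ ndo, PySem.Set.ofList_eq_self_of_nodup _ ndn]
    rw [List.filter_append]
    have h0 : (extract_keyword_map_py s1).keys.filter
        (fun n => ! (extract_keyword_map_py s1).contains n && ! (extract_keyword_map_py s3).contains n) = [] := by
      refine List.filter_eq_nil_iff.mpr ?_
      intro x hx
      simp [hokC x hx]
    rw [h0, List.nil_append]
    simp only [PySem.Set.diff, List.filter_filter]
    apply List.filter_congr
    intro x hx
    rw [hSet, ← PySem.Dict.contains_eq_decide_mem_keys]
    cases hc : (extract_keyword_map_py s1).contains x <;>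
      cases ht : (extract_keyword_map_py s3).contains x <;> simp [hc, ht]
  · -- deleted component
    show (PySem.Set.diff (PySem.Set.ofList (extract_keyword_map_py s1).keys)
          (PySem.Set.ofList (extract_keyword_map_py s2).keys)).filter
          (fun name => (extract_keyword_map_py s3).contains name) = _
    dsimp only
    rw [PySem.Set.ofList_eq_self_of_nodup _ ndo, PySem.Set.ofList_eq_self_of_nodup _ ndn]
    rw [List.filter_append]
    have h0 : ((extract_keyword_map_py s2).keys.filter (fun n => ! (extract_keyword_map_py s1).contains n)).filter
        (fun n => (extract_keyword_map_py s1).contains n && ! (extract_keyword_map_py s2).contains n &&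
          (extract_keyword_map_py s3).contains n) = [] := by
      rw [List.filter_filter]
      refine List.filter_eq_nil_iff.mpr ?_
      intro x hx
      cases hc : (extract_keyword_map_py s1).contains x <;> simp [hc]
    rw [h0, List.append_nil]
    simp only [PySem.Set.diff, List.filter_filter]
    apply List.filter_congr
    intro x hx
    rw [hSet, ← PySem.Dict.contains_eq_decide_mem_keys]
    rw [hokC x hx]
    cases hn : (extract_keyword_map_py s2).contains x <;>
      cases ht : (extract_keyword_map_py s3).contains x <;> simp [hn, ht]
  · -- modified component
    show ((PySem.Set.inter (PySem.Set.ofList (extract_keyword_map_py s1).keys)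
          (PySem.Set.ofList (extract_keyword_map_py s2).keys)).filter
          (fun name => PySem.Dict.getD (extract_keyword_map_py s1) name "" != PySem.Dict.getD (extract_keyword_map_py s2) name "")).filter
          (fun name => (extract_keyword_map_py s3).contains name) = _
    dsimp only
    rw [PySem.Set.ofList_eq_self_of_nodup _ ndo, PySem.Set.ofList_eq_self_of_nodup _ ndn]
    rw [List.filter_append]
    have h0 : ((extract_keyword_map_py s2).keys.filter (fun n => ! (extract_keyword_map_py s1).contains n)).filter
        (fun n => (extract_keyword_map_py s1).contains n && (extract_keyword_map_py s2).contains n &&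
          (PySem.Dict.getD (extract_keyword_map_py s1) n "" != PySem.Dict.getD (extract_keyword_map_py s2) n "") &&
          (extract_keyword_map_py s3).contains n) = [] := by
      rw [List.filter_filter]
      refine List.filter_eq_nil_iff.mpr ?_
      intro x hx
      cases hc : (extract_keyword_map_py s1).contains x <;> simp [hc]
    rw [h0, List.append_nil]
    simp only [PySem.Set.inter, List.filter_filter]
    apply List.filter_congr
    intro x hx
    rw [hSet, ← PySem.Dict.contains_eq_decide_mem_keys]
    rw [hokC x hx]
    cases hn : (extract_keyword_map_py s2).contains x <;>
      cases ht : (extract_keyword_map_py s3).contains x <;>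
        cases hb : (PySem.Dict.getD (extract_keyword_map_py s1) x "" != PySem.Dict.getD (extract_keyword_map_py s2) x "") <;>
          simp [hn, ht, hb]

-- ===== VERDICT (by name: the statement is the Claim_ definition above) =====
theorem compute_expected_target_delta_py_spec : Claim_equal_compute_expected_target_delta_py := by
  intro s1 s2 s3 _
  exact pv_main s1 s2 s3
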